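-- pv_equiv track=rewrite | github.com/PawelBuczek/questionnairegenerator | b_add_indicators.py | add_indicators
-- ===== SOURCE A (Python) =====
-- def add_indicators(s: str) -> str:  # rework it to modify the txt file
--     ind = ":regional_indicator_"
--     indicator_letter_dict = {1: f"{ind}a:", 2: f"{ind}b:", 3: f"{ind}c:", 4: f"{ind}d:", 5: f"{ind}e:",
--                              6: f"{ind}f:", 7: f"{ind}g:", 8: f"{ind}h:", 9: f"{ind}i:", 10: f"{ind}j:",
--                              11: f"{ind}k:", 12: f"{ind}l:", 13: f"{ind}m:", 14: f"{ind}n:", 15: f"{ind}o:",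
--                              16: f"{ind}p:", 17: f"{ind}q:", 18: f"{ind}r:", 19: f"{ind}s:", 20: f"{ind}t:",
--                              21: f"{ind}u:", 22: f"{ind}v:", 23: f"{ind}w:", 24: f"{ind}x:", 25: f"{ind}y:",
--                              26: f"{ind}z:"}
--     for i in range(26):
--         s = s.replace("\nX", f"\n{indicator_letter_dict.get(i+1)} ", 1)
--
--     return s
-- ===== SOURCE B (Python) =====
-- LETTERS = "abcdefghijklmnopqrstuvwxyz"
--
--
-- def add_indicators(s: str) -> str:  # single left-to-right scan instead of 26 rescanning replace calls
--     out = []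
--     i = 0
--     count = 0
--     n = len(s)
--     while i < n:
--         if count < 26 and s.startswith("\nX", i):
--             out.append(f"\n:regional_indicator_{LETTERS[count]}: ")
--             count += 1
--             i += 2
--         else:
--             out.append(s[i])
--             i += 1
--     return "".join(out)
-- ===== Notes on version B (the rewrite author's own statement) =====
-- stated objective: alternative
-- what changed: B replaces A's loop of 26 one-shot str.replace calls (each rescanning the string from the start) by a single left-to-right scan with a counter that substitutes the first 26 ' X' occurrences with the lettered indicator markers in one pass; fewer character visits, but no measured wall-clock win.
import Mathlib
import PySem

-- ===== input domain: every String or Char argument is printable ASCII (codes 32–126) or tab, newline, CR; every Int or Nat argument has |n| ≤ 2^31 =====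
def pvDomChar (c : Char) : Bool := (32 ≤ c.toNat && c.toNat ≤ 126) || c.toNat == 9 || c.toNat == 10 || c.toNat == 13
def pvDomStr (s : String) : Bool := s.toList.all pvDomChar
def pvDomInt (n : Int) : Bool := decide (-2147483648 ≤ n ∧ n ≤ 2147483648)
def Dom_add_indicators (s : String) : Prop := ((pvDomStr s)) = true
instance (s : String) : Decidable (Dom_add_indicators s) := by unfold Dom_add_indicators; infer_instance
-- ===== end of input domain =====

-- B replaces A's 26 rescanning one-shot `str.replace` calls by a single left-to-right scan with a counter (objective: alternative, one pass).

-- ===== PORT A =====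
-- exact hand port of Python's `s.replace(old, new, 1)` for nonempty `old`:
-- replace the leftmost occurrence of `old` (if any) by `new`
def pvReplace1 (s old new : List Char) : List Char :=
  if PySem.Chars.find s old < 0 then s
  else s.take (PySem.Chars.find s old).toNat ++ new ++
       s.drop ((PySem.Chars.find s old).toNat + old.length)

-- str(x) inside the f-string, x : Optional[str] (None is never reached: the dict has keys 1..26)
def pvFmtOpt : Option String → String
  | some v => v
  | none => "None"

def pvInd : String := ":regional_indicator_"

def pvIndDict : PySem.Dict Int String :=
  ((((((((((((((((((((((((((PySem.Dict.empty.insert 1 (pvInd ++ "a:")).insert 2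
    (pvInd ++ "b:")).insert 3 (pvInd ++ "c:")).insert 4 (pvInd ++ "d:")).insert 5
    (pvInd ++ "e:")).insert 6 (pvInd ++ "f:")).insert 7 (pvInd ++ "g:")).insert 8
    (pvInd ++ "h:")).insert 9 (pvInd ++ "i:")).insert 10 (pvInd ++ "j:")).insert 11
    (pvInd ++ "k:")).insert 12 (pvInd ++ "l:")).insert 13 (pvInd ++ "m:")).insert 14
    (pvInd ++ "n:")).insert 15 (pvInd ++ "o:")).insert 16 (pvInd ++ "p:")).insert 17
    (pvInd ++ "q:")).insert 18 (pvInd ++ "r:")).insert 19 (pvInd ++ "s:")).insert 20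
    (pvInd ++ "t:")).insert 21 (pvInd ++ "u:")).insert 22 (pvInd ++ "v:")).insert 23
    (pvInd ++ "w:")).insert 24 (pvInd ++ "x:")).insert 25 (pvInd ++ "y:")).insert 26
    (pvInd ++ "z:"))

def add_indicators (s : String) : String :=
  String.ofList
    ((PySem.List.pyRange 0 26 1).foldl
      (fun cs i =>
        pvReplace1 cs "\nX".toList
          ("\n".toList ++ (pvFmtOpt (pvIndDict.get? (i + 1))).toList ++ " ".toList))
      s.toList)

-- ===== PORT B =====
def pvLetters : String := "abcdefghijklmnopqrstuvwxyz"

-- f"\n:regional_indicator_{LETTERS[count]}: "; LETTERS[count] is in range on every reached call (count < 26)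
def pvMarker (cnt : Nat) : List Char :=
  ('\n' :: ":regional_indicator_".toList) ++ [pvLetters.toList[cnt]!] ++ ": ".toList

-- the while loop of B: one scan, consuming "\nX" (2 chars) on a match while count < 26
def pvScan : List Char → Nat → List Char
  | '\n' :: 'X' :: rest, cnt =>
      if cnt < 26 then pvMarker cnt ++ pvScan rest (cnt + 1)
      else '\n' :: pvScan ('X' :: rest) cnt
  | c :: rest, cnt => c :: pvScan rest cnt
  | [], _ => []
termination_by cs _ => cs.length
decreasing_by all_goals simp

def add_indicators_alt (s : String) : String :=
  String.ofList (pvScan s.toList 0)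

-- ===== PRECONDITION & SPEC =====
def Spec_add_indicators (s : String) (out : String) : Prop := out = add_indicators_alt s
instance (s : String) (out : String) : Decidable (Spec_add_indicators s out) := by unfold Spec_add_indicators; infer_instance

-- ===== CLAIM (what is proved, stated in full; the proofs are below) =====
def Claim_equal_add_indicators : Prop := ∀ (s : String), Dom_add_indicators s → Spec_add_indicators s (add_indicators s)

-- ===== LEMMAS AND PROOFS =====

-- an occurrence of the marker "\nX" at position j
def pvOcc (l : List Char) (j : Nat) : Prop := ['\n', 'X'] <+: l.drop j

theorem pvOcc_iff (l : List Char) (j : Nat) :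
    pvOcc l j ↔ l[j]? = some '\n' ∧ l[j + 1]? = some 'X' := by
  constructor
  · rintro ⟨r, hr⟩
    have h0 : (l.drop j)[0]? = some '\n' := by rw [← hr]; rfl
    have h1 : (l.drop j)[1]? = some 'X' := by rw [← hr]; rfl
    rw [List.getElem?_drop] at h0 h1
    exact ⟨h0, h1⟩
  · rintro ⟨h0, h1⟩
    have hj : j < l.length := (List.getElem?_eq_some_iff.mp h0).1
    have hj1 : j + 1 < l.length := (List.getElem?_eq_some_iff.mp h1).1
    refine ⟨l.drop (j + 2), ?_⟩
    rw [List.drop_eq_getElem_cons hj, List.drop_eq_getElem_cons hj1]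
    have e0 : l[j] = '\n' := ((List.getElem?_eq_some_iff.mp h0).2)
    have e1 : l[j + 1] = 'X' := ((List.getElem?_eq_some_iff.mp h1).2)
    simp [e0, e1]

theorem pvInfix_iff_occ (l : List Char) :
    ['\n', 'X'] <:+: l ↔ ∃ j, pvOcc l j := by
  rw [← PySem.Chars.isIn_iff_infix, ← PySem.Chars.exists_prefix_drop_iff_isIn]
  rfl

theorem pvScan_stop (l : List Char) (cnt : Nat) (h : 26 ≤ cnt) : pvScan l cnt = l := by
  induction l, cnt using pvScan.induct with
  | case1 rest cnt hlt ih => omega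
  | case2 rest cnt hlt ih => simp [pvScan, hlt, ih h]
  | case3 c rest cnt hne ih => rw [pvScan.eq_def]; split <;> simp_all
  | case4 cnt => simp [pvScan]

theorem pvScan_noocc (l : List Char) (cnt : Nat) (h : ∀ j, ¬ pvOcc l j) :
    pvScan l cnt = l := by
  induction l, cnt using pvScan.induct with
  | case1 rest cnt hlt ih =>
      exact absurd ⟨rest, rfl⟩ (h 0)
  | case2 rest cnt hlt ih =>
      exact absurd ⟨rest, rfl⟩ (h 0)
  | case3 c rest cnt hne ih =>
      have h' : ∀ j, ¬ pvOcc rest j := by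
        intro j hj
        rw [pvOcc_iff] at hj
        exact h (j + 1) (by rw [pvOcc_iff]; simpa using hj)
      rw [pvScan.eq_def]; split <;> simp_all
  | case4 cnt => simp [pvScan]

theorem pvScan_cons (c : Char) (t : List Char) (cnt : Nat)
    (h : ¬ pvOcc (c :: t) 0) : pvScan (c :: t) cnt = c :: pvScan t cnt := by
  rw [pvScan.eq_def]
  split
  · rename_i heq
    injection heq with h1 h2
    subst h1; subst h2
    exact absurd ⟨_, rfl⟩ h
  · rename_i heq
    injection heq with h1 h2
    rw [h1, h2]
  · rename_i heq; exact absurd heq (List.cons_ne_nil c t)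

theorem pvScan_append (u w : List Char) (cnt : Nat)
    (h : ∀ j, j < u.length → ¬ pvOcc (u ++ w) j) :
    pvScan (u ++ w) cnt = u ++ pvScan w cnt := by
  induction u with
  | nil => simp
  | cons c u' ih =>
      rw [List.cons_append, pvScan_cons c (u' ++ w) cnt (h 0 (by simp))]
      rw [ih (fun j hj => by
        intro hocc
        rw [pvOcc_iff] at hocc
        exact h (j + 1) (by simpa using hj) (by rw [pvOcc_iff]; simpa using hocc))]
      rfl

theorem pvReplace1_shift (u v new : List Char)
    (hu : ∀ w j, j < u.length → ¬ pvOcc (u ++ w) j) :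
    pvReplace1 (u ++ v) ['\n', 'X'] new = u ++ pvReplace1 v ['\n', 'X'] new := by
  have hdropj : ∀ j, u.length ≤ j → (u ++ v).drop j = v.drop (j - u.length) := by
    intro j hj
    rw [List.drop_append, List.drop_eq_nil_of_le hj, List.nil_append]
  by_cases hv : ['\n', 'X'] <:+: v
  · have hfv0 : 0 ≤ PySem.Chars.find v ['\n', 'X'] :=
      (PySem.Chars.find_nonneg_iff v ['\n', 'X']).mpr hv
    obtain ⟨hpre_v, hmin_v⟩ := PySem.Chars.find_spec hfv0
    have hql : PySem.Chars.find v ['\n', 'X'] ≤ (v.length : Int) :=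
      PySem.Chars.find_le_length v ['\n', 'X']
    have huv : ['\n', 'X'] <:+: (u ++ v) := by
      rw [pvInfix_iff_occ]
      refine ⟨u.length + (PySem.Chars.find v ['\n', 'X']).toNat, ?_⟩
      show ['\n', 'X'] <+: (u ++ v).drop _
      rw [hdropj _ (by omega)]
      simpa using hpre_v
    have hf0 : 0 ≤ PySem.Chars.find (u ++ v) ['\n', 'X'] :=
      (PySem.Chars.find_nonneg_iff (u ++ v) ['\n', 'X']).mpr huv
    obtain ⟨hpre, hmin⟩ := PySem.Chars.find_spec hf0
    have hpu : u.length ≤ (PySem.Chars.find (u ++ v) ['\n', 'X']).toNat := by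
      by_contra h'
      exact hu v _ (by omega) hpre
    have h1 : (PySem.Chars.find v ['\n', 'X']).toNat ≤
        (PySem.Chars.find (u ++ v) ['\n', 'X']).toNat - u.length := by
      by_contra h'
      refine hmin_v ((PySem.Chars.find (u ++ v) ['\n', 'X']).toNat - u.length) (by omega) ?_
      rw [← hdropj _ hpu]
      exact hpre
    have h2 : (PySem.Chars.find (u ++ v) ['\n', 'X']).toNat ≤
        u.length + (PySem.Chars.find v ['\n', 'X']).toNat := by
      by_contra h'
      refine hmin (u.length + (PySem.Chars.find v ['\n', 'X']).toNat) (by omega) ?_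
      rw [hdropj _ (by omega)]
      simpa using hpre_v
    have hpq : (PySem.Chars.find (u ++ v) ['\n', 'X']).toNat =
        u.length + (PySem.Chars.find v ['\n', 'X']).toNat := by omega
    unfold pvReplace1
    rw [if_neg (not_lt.mpr hf0), if_neg (not_lt.mpr hfv0), hpq]
    rw [List.take_append, List.take_of_length_le (by omega), List.length_cons,
      List.length_cons, List.length_nil, List.drop_append,
      List.drop_eq_nil_of_le (by omega)]
    simp only [List.nil_append, List.append_assoc, Nat.add_assoc, Nat.add_sub_cancel_left]
  · have hfv : PySem.Chars.find v ['\n', 'X'] = -1 :=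
      (PySem.Chars.find_eq_neg_one_iff v ['\n', 'X']).mpr hv
    have huv : PySem.Chars.find (u ++ v) ['\n', 'X'] = -1 := by
      rw [PySem.Chars.find_eq_neg_one_iff, pvInfix_iff_occ]
      rintro ⟨j, hj⟩
      by_cases hju : j < u.length
      · exact hu v j hju hj
      · refine hv ((pvInfix_iff_occ v).mpr ⟨j - u.length, ?_⟩)
        show ['\n', 'X'] <+: v.drop _
        rw [← hdropj _ (by omega)]
        exact hj
    unfold pvReplace1
    rw [hfv, huv]
    norm_num

theorem pvFold_shift (u : List Char) (m : Int → List Char)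
    (hu : ∀ w j, j < u.length → ¬ pvOcc (u ++ w) j) :
    ∀ (ks : List Int) (v : List Char),
      ks.foldl (fun cs j => pvReplace1 cs ['\n', 'X'] (m j)) (u ++ v) =
        u ++ ks.foldl (fun cs j => pvReplace1 cs ['\n', 'X'] (m j)) v := by
  intro ks
  induction ks with
  | nil => intro v; simp
  | cons k ks ih =>
      intro v
      simp only [List.foldl_cons]
      rw [pvReplace1_shift u v (m k) hu, ih]

theorem pvLetter_ne_nl (k : Nat) : pvLetters.toList[k]! ≠ '\n' := by
  rw [List.getElem!_eq_getElem?_getD]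
  by_cases hk : k < pvLetters.toList.length
  · intro h
    rw [List.getElem?_eq_getElem hk] at h
    have : pvLetters.toList[k] ∈ pvLetters.toList := List.getElem_mem hk
    rw [show pvLetters.toList[k] = '\n' from h] at this
    revert this
    decide
  · rw [List.getElem?_eq_none (by omega)]
    decide

theorem pvMarker_body (k : Nat) : pvMarker k =
    '\n' :: (":regional_indicator_".toList ++ [pvLetters.toList[k]!] ++ ": ".toList) := by
  simp [pvMarker]

theorem pvMarker_nl (k m : Nat) (h : (pvMarker k)[m]? = some '\n') : m = 0 := by
  cases m with
  | zero => rfl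
  | succ m' =>
      exfalso
      rw [pvMarker_body, List.getElem?_cons_succ] at h
      have hmem : '\n' ∈ ":regional_indicator_".toList ++ [pvLetters.toList[k]!] ++ ": ".toList :=
        List.mem_of_getElem? h
      rcases List.mem_append.mp hmem with hmem | hmem
      · rcases List.mem_append.mp hmem with hmem | hmem
        · revert hmem; decide
        · exact pvLetter_ne_nl k (List.mem_singleton.mp hmem).symm
      · revert hmem; decide

theorem pvMarker_zero (k : Nat) : (pvMarker k)[0]? = some '\n' := by
  rw [pvMarker_body]; rfl

theorem pvMarker_one (k : Nat) : (pvMarker k)[1]? = some ':' := by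
  rw [pvMarker_body]; rfl

theorem pvMarker_len (k : Nat) : (pvMarker k).length = 24 := by
  rw [pvMarker_body]; simp

-- the prefix (up to the first occurrence) followed by a freshly inserted marker is occurrence-free
theorem pvClean (s : List Char) (p k : Nat) (hp : p ≤ s.length)
    (hmin : ∀ i, i < p → ¬ pvOcc s i) :
    ∀ w j, j < (s.take p ++ pvMarker k).length → ¬ pvOcc ((s.take p ++ pvMarker k) ++ w) j := by
  intro w j hj hocc
  rw [pvOcc_iff] at hocc
  obtain ⟨h0, h1⟩ := hocc
  have hulen : (s.take p).length = p := by rw [List.length_take]; omega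
  have hlen2 : (s.take p ++ pvMarker k).length = p + 24 := by
    rw [List.length_append, hulen, pvMarker_len]
  rw [hlen2] at hj
  rw [List.append_assoc] at h0 h1
  have keyLow : ∀ i, i < p → (s.take p ++ (pvMarker k ++ w))[i]? = s[i]? := by
    intro i hi
    rw [List.getElem?_append, hulen, if_pos hi, List.getElem?_take, if_pos hi]
  have keyMid : ∀ i, p ≤ i → i < p + 24 →
      (s.take p ++ (pvMarker k ++ w))[i]? = (pvMarker k)[i - p]? := by
    intro i hi hi2
    rw [List.getElem?_append, hulen, if_neg (by omega), List.getElem?_append,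
      pvMarker_len, if_pos (by omega)]
  by_cases hA : j + 1 < p
  · rw [keyLow j (by omega)] at h0
    rw [keyLow (j + 1) hA] at h1
    exact hmin j (by omega) ((pvOcc_iff s j).mpr ⟨h0, h1⟩)
  · by_cases hB : j < p
    · rw [keyMid (j + 1) (by omega) (by omega)] at h1
      have he : j + 1 - p = 0 := by omega
      rw [he, pvMarker_zero] at h1
      exact absurd (Option.some.inj h1) (by decide)
    · rw [keyMid j (by omega) (by omega)] at h0
      have hj0 : j - p = 0 := pvMarker_nl k (j - p) h0
      rw [keyMid (j + 1) (by omega) (by omega)] at h1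
      have he : j + 1 - p = 1 := by omega
      rw [he, pvMarker_one] at h1
      exact absurd (Option.some.inj h1) (by decide)

-- the heart: the remaining 26 - k replace-first calls equal the scan started with counter k
theorem pvLoop (n : Nat) : ∀ (k : Nat) (s : List Char), k + n = 26 →
    (PySem.List.pyRange k 26 1).foldl
        (fun cs j => pvReplace1 cs ['\n', 'X'] (pvMarker j.toNat)) s = pvScan s k := by
  induction n with
  | zero =>
      intro k s hk
      have hk26 : k = 26 := by omega
      subst hk26
      rw [show PySem.List.pyRange ((26 : Nat) : Int) 26 = [] from by decide, List.foldl_nil,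
        pvScan_stop s 26 (le_refl _)]
  | succ n ih =>
      intro k s hk
      have hklt : (k : Int) < 26 := by omega
      rw [PySem.List.pyRange_one_cons hklt, List.foldl_cons,
        show ((k : Int) + 1) = ((k + 1 : Nat) : Int) from by push_cast; ring]
      simp only [Int.toNat_natCast]
      by_cases hocc : ['\n', 'X'] <:+: s
      · have hf0 : 0 ≤ PySem.Chars.find s ['\n', 'X'] :=
          (PySem.Chars.find_nonneg_iff s ['\n', 'X']).mpr hocc
        obtain ⟨hpre, hmin'⟩ := PySem.Chars.find_spec hf0
        have hfl : PySem.Chars.find s ['\n', 'X'] ≤ (s.length : Int) :=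
          PySem.Chars.find_le_length s ['\n', 'X']
        have hps : (PySem.Chars.find s ['\n', 'X']).toNat ≤ s.length := by omega
        obtain ⟨r, hr⟩ := hpre
        have hrr : r = s.drop ((PySem.Chars.find s ['\n', 'X']).toNat + 2) := by
          have h2 := congrArg (List.drop 2) hr
          simp only [List.drop_append] at h2
          simpa [List.drop_drop, Nat.add_comm] using h2
        have hs : s = s.take (PySem.Chars.find s ['\n', 'X']).toNat ++
            ('\n' :: 'X' :: s.drop ((PySem.Chars.find s ['\n', 'X']).toNat + 2)) := by
          conv_lhs => rw [← List.take_append_drop (PySem.Chars.find s ['\n', 'X']).toNat s]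
          rw [← hr, hrr]
          rfl
        have hstep : pvReplace1 s ['\n', 'X'] (pvMarker k) =
            (s.take (PySem.Chars.find s ['\n', 'X']).toNat ++ pvMarker k) ++
              s.drop ((PySem.Chars.find s ['\n', 'X']).toNat + 2) := by
          unfold pvReplace1
          rw [if_neg (not_lt.mpr hf0)]
          simp [List.append_assoc]
        have hclean := pvClean s (PySem.Chars.find s ['\n', 'X']).toNat k hps
          (fun i hi => hmin' i hi)
        rw [hstep, pvFold_shift _ _ hclean _ _, ih (k + 1) _ (by omega)]
        conv_rhs => rw [hs]
        rw [pvScan_append _ _ k (fun j hj => by rw [← hs]; exact hmin' j (by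
          rw [List.length_take] at hj; omega))]
        rw [show pvScan ('\n' :: 'X' :: s.drop ((PySem.Chars.find s ['\n', 'X']).toNat + 2)) k =
              pvMarker k ++ pvScan (s.drop ((PySem.Chars.find s ['\n', 'X']).toNat + 2)) (k + 1) from by
          simp [pvScan, show k < 26 from by omega]]
        rw [List.append_assoc]
      · have hf : PySem.Chars.find s ['\n', 'X'] = -1 :=
          (PySem.Chars.find_eq_neg_one_iff s ['\n', 'X']).mpr hocc
        have hnone : ∀ j, ¬ pvOcc s j := by
          intro j hj
          exact hocc ((pvInfix_iff_occ s).mpr ⟨j, hj⟩)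
        have hstep : pvReplace1 s ['\n', 'X'] (pvMarker k) = s := by
          unfold pvReplace1
          rw [hf]
          norm_num
        rw [hstep, ih (k + 1) s (by omega), pvScan_noocc s (k + 1) hnone,
          pvScan_noocc s k hnone]

theorem pvStep_eq : ∀ i ∈ PySem.List.pyRange 0 26 1,
    ("\n".toList ++ (pvFmtOpt (pvIndDict.get? (i + 1))).toList ++ " ".toList) =
      pvMarker i.toNat := by
  decide

theorem pvSep_eq : "\nX".toList = ['\n', 'X'] := rfl

-- ===== VERDICT (by name: the statement is the Claim_ definition above) =====
theorem add_indicators_spec : Claim_equal_add_indicators := by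
  intro s _
  unfold Spec_add_indicators add_indicators add_indicators_alt
  apply congrArg
  rw [PySem.List.foldl_congr_mem
        (g := fun cs j => pvReplace1 cs ['\n', 'X'] (pvMarker j.toNat))
        (h := fun acc x hx => by rw [pvStep_eq x hx, pvSep_eq])]
  exact pvLoop 26 0 s.toList rfl
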